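-- pv_equiv track=rewrite | github.com/ZhengElvisLONG/UNSW-Master-of-IT-Code-of-Elvis | 2025T1/9021/quiz2.py | f
-- ===== SOURCE A (Python) =====
-- def f(L):
--     result = []
--     for i in range(len(L)):
--         if L[i] < i:
--             result.append(L[i])
--     for i in range(len(L)):
--         if L[i] == i:
--             result.append(L[i])
--     for i in range(len(L)):
--         if L[i] > i:
--             result.append(L[i])
--     return result
-- ===== SOURCE B (Python) =====
-- def f(L):
--     less, equal, greater = [], [], []
--     for i, x in enumerate(L):
--         if x < i:
--             less.append(x)
--         elif x == i:
--             equal.append(x)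
--         else:
--             greater.append(x)
--     return less + equal + greater
-- ===== Notes on version B (the rewrite author's own statement) =====
-- stated objective: simpler
-- what changed: Replaces A's three sequential full scans of L (one per comparison with the index) by a single enumerate pass that partitions elements into three explicit buckets (less, equal, greater) and concatenates them.
import Mathlib
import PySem

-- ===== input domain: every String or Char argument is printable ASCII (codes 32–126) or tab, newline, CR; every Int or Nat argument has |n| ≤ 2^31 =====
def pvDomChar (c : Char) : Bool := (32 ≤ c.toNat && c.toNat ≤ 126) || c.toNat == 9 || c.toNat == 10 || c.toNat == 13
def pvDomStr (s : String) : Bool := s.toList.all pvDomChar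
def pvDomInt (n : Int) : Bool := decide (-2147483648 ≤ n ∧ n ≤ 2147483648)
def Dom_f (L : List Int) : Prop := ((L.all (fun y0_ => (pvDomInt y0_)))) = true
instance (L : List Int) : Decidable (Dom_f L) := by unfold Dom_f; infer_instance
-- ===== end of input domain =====

-- B replaces A's three sequential index scans by one enumerate pass into three buckets (objective: simpler).

-- ===== PORT A =====
-- three loops 'for i in range(len(L))', each appending L[i] on its comparison with i
def f (L : List Int) : List Int :=
  let r1 := (PySem.List.pyRange 0 (PySem.List.len L) 1).foldl
      (fun result i => if PySem.List.pyGetD L i 0 < i then result ++ [PySem.List.pyGetD L i 0] else result) []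
  let r2 := (PySem.List.pyRange 0 (PySem.List.len L) 1).foldl
      (fun result i => if PySem.List.pyGetD L i 0 = i then result ++ [PySem.List.pyGetD L i 0] else result) r1
  let r3 := (PySem.List.pyRange 0 (PySem.List.len L) 1).foldl
      (fun result i => if PySem.List.pyGetD L i 0 > i then result ++ [PySem.List.pyGetD L i 0] else result) r2
  r3

-- ===== PORT B =====
-- one pass over enumerate(L) maintaining the three buckets (less, equal, greater)
def f_alt (L : List Int) : List Int :=
  let b := (PySem.List.enumerate L).foldl
      (fun (s : List Int × List Int × List Int) p =>
        if p.2 < p.1 then (s.1 ++ [p.2], s.2.1, s.2.2)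
        else if p.2 = p.1 then (s.1, s.2.1 ++ [p.2], s.2.2)
        else (s.1, s.2.1, s.2.2 ++ [p.2]))
      ([], [], [])
  b.1 ++ b.2.1 ++ b.2.2

-- ===== PRECONDITION & SPEC =====
def Spec_f (L : List Int) (out : List Int) : Prop := out = f_alt L
instance (L : List Int) (out : List Int) : Decidable (Spec_f L out) := by unfold Spec_f; infer_instance

-- ===== CLAIM (what is proved, stated in full; the proofs are below) =====
def Claim_equal_f : Prop := ∀ (L : List Int), Dom_f L → Spec_f L (f L)

-- ===== LEMMAS AND PROOFS =====

-- enumerate of a snoc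
theorem enum_snoc (L : List Int) (x : Int) (s : Int) :
    PySem.List.enumerate (L ++ [x]) s
      = PySem.List.enumerate L s ++ [(s + (L.length : Int), x)] := by
  induction L generalizing s with
  | nil => simp [PySem.List.enumerate_nil, PySem.List.enumerate_cons]
  | cons a t ih =>
      simp [PySem.List.enumerate_cons, ih (s + 1)]
      ring_nf

-- A's index loop collects exactly the enumerate entries satisfying its comparison
theorem afold (p : Int → Int → Prop) [DecidableRel p] (L : List Int) (acc : List Int) :
    (List.range L.length).foldl
        (fun r k => if p (L.getD k 0) (k : Int) then r ++ [L.getD k 0] else r) acc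
      = acc ++ ((PySem.List.enumerate L).filter (fun q => decide (p q.2 q.1))).map (·.2) := by
  induction L using List.reverseRecOn generalizing acc with
  | nil => simp [PySem.List.enumerate_nil]
  | append_singleton t x ih =>
      have hlen : (t ++ [x]).length = t.length + 1 := by simp
      rw [hlen, List.range_succ, List.foldl_append]
      have hc : ∀ (r : List Int), ∀ k ∈ List.range t.length,
          (fun r k => if p ((t ++ [x]).getD k 0) (k : Int) then r ++ [(t ++ [x]).getD k 0] else r) r k
            = (fun r k => if p (t.getD k 0) (k : Int) then r ++ [t.getD k 0] else r) r k := by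
        intro r k hk
        simp only
        rw [List.getD_append t [x] 0 k (List.mem_range.mp hk)]
      rw [PySem.List.foldl_congr_mem _ _ _ _ hc, ih acc]
      have hx : (t ++ [x]).getD t.length 0 = x := by simp [List.getD]
      simp only [List.foldl_cons, List.foldl_nil, hx, enum_snoc t x 0, List.filter_append,
        List.map_append, zero_add]
      by_cases h : p x (t.length : Int)
      · simp [h, List.append_assoc]
      · simp [h]

-- B's single pass fills the three buckets with the three filtered projections
theorem bfold (ps : List (Int × Int)) (a b c : List Int) :
    ps.foldl
        (fun (s : List Int × List Int × List Int) p =>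
          if p.2 < p.1 then (s.1 ++ [p.2], s.2.1, s.2.2)
          else if p.2 = p.1 then (s.1, s.2.1 ++ [p.2], s.2.2)
          else (s.1, s.2.1, s.2.2 ++ [p.2])) (a, b, c)
      = (a ++ (ps.filter (fun q => decide (q.2 < q.1))).map (·.2),
         b ++ (ps.filter (fun q => decide (q.2 = q.1))).map (·.2),
         c ++ (ps.filter (fun q => decide (q.1 < q.2))).map (·.2)) := by
  induction ps generalizing a b c with
  | nil => simp
  | cons q ps ih =>
      by_cases h1 : q.2 < q.1
      · have h2 : ¬ q.2 = q.1 := by omega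
        have h3 : ¬ q.1 < q.2 := by omega
        simp [List.foldl_cons, h1, h2, h3, ih]
      · by_cases h2 : q.2 = q.1
        · have h3 : ¬ q.1 < q.2 := by omega
          simp [List.foldl_cons, h2, ih]
        · have h3 : q.1 < q.2 := by omega
          simp [List.foldl_cons, h1, h2, h3, ih]

-- ===== VERDICT (by name: the statement is the Claim_ definition above) =====
theorem f_spec : Claim_equal_f := by
  intro L _
  unfold Spec_f f f_alt
  simp only [PySem.List.len_eq, PySem.List.pyRange_zero_natCast, List.foldl_map,
    PySem.List.pyGetD_natCast]
  rw [afold (fun v i => v < i) L [], afold (fun v i => v = i) L _, afold (fun v i => v > i) L _,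
    bfold (PySem.List.enumerate L) [] [] []]
  simp [List.append_assoc]
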